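-- pv_equiv track=rewrite | github.com/shutpa01/cryptic_solver_v2 | classifier/align_fodder.py | _align_anagram
-- ===== SOURCE A (Python) =====
-- def _align_anagram(yields, available, tokens, consumed):
--     """Sliding window: find contiguous words whose sorted letters match sorted yields."""
--     if not yields:
--         return None
--
--     target = sorted(yields.lower().replace(" ", ""))
--     avail_indices = sorted(i for i, _, _ in available)
--
--     # Try windows of different sizes
--     for window_size in range(1, len(avail_indices) + 1):
--         # Try contiguous windows from the full token list (not just available)
--         for start in range(len(tokens)):
--             end = start + window_size
--             if end > len(tokens):
--                 break
--             indices = set(range(start, end))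
--             # At least some of these should be available (not all consumed)
--             if not indices - consumed:
--                 continue
--
--             span_words = [tokens[j][1] for j in range(start, end)]
--             span_letters = sorted("".join(span_words).replace(" ", ""))
--             if span_letters == target:
--                 raw_span = " ".join(tokens[j][0] for j in range(start, end))
--                 return raw_span, "anagram_scan"
--
--     return None
-- ===== SOURCE B (Python) =====
-- def _align_anagram(yields, available, tokens, consumed):
--     """Prefix char-count vectors: each window test is an O(256) vector compare
--     (plus O(1) consumed check via a prefix count) instead of re-joining and
--     re-sorting the window's letters."""
--     if not yields:
--         return None
--
--     def vec(chars):
--         v = [0] * 256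
--         for c in chars:
--             v[ord(c)] += 1
--         return v
--
--     target = vec(c for c in yields.lower() if c != ' ')
--
--     # pref[i] = letter-count vector of tokens[0:i]; cons[i] = how many of 0..i-1 are consumed
--     pref = [[0] * 256]
--     cons = [0]
--     pv, cv = pref[0], 0
--     for j, (_, w) in enumerate(tokens):
--         pv = [a + b for a, b in zip(pv, vec(c for c in w if c != ' '))]
--         cv = cv + (1 if j in consumed else 0)
--         pref.append(pv)
--         cons.append(cv)
--
--     for ws in range(1, len(available) + 1):
--         for start, (ps, pe, cs, ce) in enumerate(zip(pref, pref[ws:], cons, cons[ws:])):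
--             if ce - cs == ws:
--                 continue  # window entirely consumed
--             if all(e - s == t for e, s, t in zip(pe, ps, target)):
--                 raw = " ".join(t[0] for t in tokens[start:start + ws])
--                 return raw, "anagram_scan"
--     return None
-- ===== Notes on version B (the rewrite author's own statement) =====
-- stated objective: faster
-- what changed: B precomputes prefix character-count vectors (and a prefix consumed count) once, so each candidate window is tested by an O(1)-size vector comparison instead of A's per-window join + sort of all window letters and per-window set difference.
import Mathlib
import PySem

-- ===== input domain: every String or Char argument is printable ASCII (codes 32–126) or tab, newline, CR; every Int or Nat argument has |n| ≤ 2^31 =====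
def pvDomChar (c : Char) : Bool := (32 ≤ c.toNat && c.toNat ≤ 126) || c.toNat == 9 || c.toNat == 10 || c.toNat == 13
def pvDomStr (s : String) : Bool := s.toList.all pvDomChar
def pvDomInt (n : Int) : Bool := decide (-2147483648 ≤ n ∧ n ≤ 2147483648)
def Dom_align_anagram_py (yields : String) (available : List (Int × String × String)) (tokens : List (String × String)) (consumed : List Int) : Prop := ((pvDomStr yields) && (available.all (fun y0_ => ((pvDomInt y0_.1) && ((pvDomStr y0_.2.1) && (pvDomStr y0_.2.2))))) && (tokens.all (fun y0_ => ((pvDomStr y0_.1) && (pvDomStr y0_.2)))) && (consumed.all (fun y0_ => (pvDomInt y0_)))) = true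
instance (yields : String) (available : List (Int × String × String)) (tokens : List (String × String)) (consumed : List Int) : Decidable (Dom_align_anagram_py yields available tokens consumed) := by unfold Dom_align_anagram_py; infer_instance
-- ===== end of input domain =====

-- B replaces A's per-window join+sort and per-window consumed-set difference by prefix
-- char-count vectors and a prefix consumed count; measured faster on the generated inputs.

-- ===== PORT A =====
-- inner `for start in range(len(tokens))` loop of A, with its break / continue / return
def pvA_inner (tokens : List (String × String)) (consumed : List Int) (target : List Char) (ws : Int) : List Int → Option (String × String)
  | [] => none
  | start :: rest =>
    if start + ws > (tokens.length : Int) then none  -- break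
    else
      let indices := PySem.Set.ofList (PySem.List.pyRange start (start + ws))
      if PySem.Set.diff indices consumed = [] then
        pvA_inner tokens consumed target ws rest     -- continue
      else
        let spanWords := (PySem.List.pyRange start (start + ws)).map (fun j => (PySem.List.pyGetD tokens j ("", "")).2)
        let spanLetters := PySem.List.sorted (PySem.Chars.replace (PySem.Str.join "" spanWords).toList [' '] []) (fun x => x)
        if spanLetters = target then
          some (PySem.Str.join " " ((PySem.List.pyRange start (start + ws)).map (fun j => (PySem.List.pyGetD tokens j ("", "")).1)), "anagram_scan")
        else
          pvA_inner tokens consumed target ws rest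

def align_anagram_py (yields : String) (available : List (Int × String × String)) (tokens : List (String × String)) (consumed : List Int) : Option (String × String) :=
  if yields.toList = [] then none
  else
    let target := PySem.List.sorted (PySem.Chars.replace (PySem.Str.lower yields).toList [' '] []) (fun x => x)
    let availIndices := PySem.List.sorted (available.map (fun t => t.1)) (fun x => x)
    (PySem.List.pyRange 1 ((availIndices.length : Int) + 1)).findSome? (fun ws =>
      pvA_inner tokens consumed target ws (PySem.List.pyRange 0 (tokens.length : Int)))

-- ===== PORT B =====
-- Source B's `vec`: 256-slot character-count vector, built by `v[ord(c)] += 1`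
def pvB_vec (cs : List Char) : List Int :=
  cs.foldl (fun v c => PySem.List.pySetD v (c.toNat : Int) (PySem.List.pyGetD v (c.toNat : Int) 0 + 1)) (List.replicate 256 0)

-- Source B's prefix loop over `enumerate(tokens)`: state (pref, cons, pv, cv), appending
def pvB_build (consumed : List Int) (tokens : List (String × String)) : List (List Int) × List Int :=
  let r := (PySem.List.enumerate tokens).foldl
    (fun st jt =>
      let pv' := List.zipWith (· + ·) st.2.2.1 (pvB_vec (jt.2.2.toList.filter (fun c => c != ' ')))
      let cv' := st.2.2.2 + (if PySem.Set.contains consumed jt.1 then 1 else 0)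
      (st.1 ++ [pv'], st.2.1 ++ [cv'], pv', cv'))
    ([List.replicate 256 0], [0], List.replicate 256 0, 0)
  (r.1, r.2.1)

def align_anagram_py_alt (yields : String) (available : List (Int × String × String)) (tokens : List (String × String)) (consumed : List Int) : Option (String × String) :=
  if yields.toList = [] then none
  else
    let target := pvB_vec ((PySem.Str.lower yields).toList.filter (fun c => c != ' '))
    let pc := pvB_build consumed tokens
    (PySem.List.pyRange 1 ((available.length : Int) + 1)).findSome? (fun ws =>
      (PySem.List.enumerate (List.zip pc.1 (List.zip (PySem.List.slice pc.1 (some ws) none) (List.zip pc.2 (PySem.List.slice pc.2 (some ws) none))))).findSome? (fun e =>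
        if e.2.2.2.2 - e.2.2.2.1 = ws then none     -- window entirely consumed: continue
        else if (List.zip e.2.2.1 (List.zip e.2.1 target)).all (fun x => x.1 - x.2.1 == x.2.2) then
          some (PySem.Str.join " " ((PySem.List.slice tokens (some e.1) (some (e.1 + ws))).map (fun t => t.1)), "anagram_scan")
        else none))

-- ===== PRECONDITION & SPEC =====
def Spec_align_anagram_py (yields : String) (available : List (Int × String × String)) (tokens : List (String × String)) (consumed : List Int) (out : Option (String × String)) : Prop := out = align_anagram_py_alt yields available tokens consumed
instance (yields : String) (available : List (Int × String × String)) (tokens : List (String × String)) (consumed : List Int) (out : Option (String × String)) : Decidable (Spec_align_anagram_py yields available tokens consumed out) := by unfold Spec_align_anagram_py; infer_instance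

-- ===== CLAIM (what is proved, stated in full; the proofs are below) =====
def Claim_equal_align_anagram_py : Prop := ∀ (yields : String) (available : List (Int × String × String)) (tokens : List (String × String)) (consumed : List Int), Dom_align_anagram_py yields available tokens consumed → Spec_align_anagram_py yields available tokens consumed (align_anagram_py yields available tokens consumed)

-- ===== LEMMAS AND PROOFS =====

-- letters of one token's word, as B filters them
def pvLW (t : String × String) : List Char := t.2.toList.filter (fun c => c != ' ')
-- letters of the first i words
def pvPre (tokens : List (String × String)) (i : Nat) : List Char := ((tokens.take i).map pvLW).flatten
-- letters of the window of w words starting at s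
def pvWin (tokens : List (String × String)) (s w : Nat) : List Char := (((tokens.drop s).take w).map pvLW).flatten
-- prefix count of consumed indices below i
def pvC (consumed : List Int) (i : Nat) : Int := ((List.range i).countP (fun j : Nat => PySem.Set.contains consumed ((j : Int))) : Nat)
-- A's per-start window check (loop body of pvA_inner, without break/continue)
def pvCheckA (tokens : List (String × String)) (consumed : List Int) (target : List Char) (ws : Int) (start : Int) : Option (String × String) :=
  if PySem.Set.diff (PySem.Set.ofList (PySem.List.pyRange start (start + ws))) consumed = [] then none
  else
    let spanWords := (PySem.List.pyRange start (start + ws)).map (fun j => (PySem.List.pyGetD tokens j ("", "")).2)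
    if PySem.List.sorted (PySem.Chars.replace (PySem.Str.join "" spanWords).toList [' '] []) (fun x => x) = target then
      some (PySem.Str.join " " ((PySem.List.pyRange start (start + ws)).map (fun j => (PySem.List.pyGetD tokens j ("", "")).1)), "anagram_scan")
    else none

theorem pv_replace_go (l : List Char) : ∀ acc, PySem.Chars.replace.go [' '] [] l.length l acc = acc.reverse ++ l.filter (fun c => c != ' ') := by
  induction l with
  | nil => intro acc; rw [PySem.Chars.replace.go.eq_def]; simp
  | cons c t ih =>
    intro acc
    rw [PySem.Chars.replace.go.eq_def]
    by_cases hc : c = ' '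
    · subst hc
      simp [List.isPrefixOf, ih]
    · have hp : ([' '].isPrefixOf (c :: t)) = false := by
        simp [List.isPrefixOf]
        exact fun h => hc h.symm
      simp [hp, ih, hc]

theorem pv_replace_filter (l : List Char) : PySem.Chars.replace l [' '] [] = l.filter (fun c => c != ' ') := by
  rw [PySem.Chars.replace]
  simp [pv_replace_go]

theorem pv_join_empty (parts : List (List Char)) : PySem.Chars.join [] parts = parts.flatten := by
  rw [PySem.Chars.join]
  induction parts with
  | nil => rfl
  | cons p ps ih =>
    cases ps with
    | nil => simp [List.intercalate]
    | cons q qs =>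
      have h : [].intercalate (p::q::qs) = p ++ [].intercalate (q::qs) := by
        simp [List.intercalate]
      rw [h, ih]
      rfl

theorem pv_vecGo_length (cs : List Char) (v : List Int) :
    (cs.foldl (fun v c => PySem.List.pySetD v (c.toNat : Int) (PySem.List.pyGetD v (c.toNat : Int) 0 + 1)) v).length = v.length := by
  induction cs generalizing v with
  | nil => rfl
  | cons c t ih =>
    rw [List.foldl_cons, ih]
    exact PySem.List.length_pySetD _ _ _

theorem pvB_vec_length (cs : List Char) : (pvB_vec cs).length = 256 := by
  unfold pvB_vec
  rw [pv_vecGo_length, List.length_replicate]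

theorem pv_vecGo_get (cs : List Char) (v : List Int) (k : Nat) (hk : k < v.length) :
    (cs.foldl (fun v c => PySem.List.pySetD v (c.toNat : Int) (PySem.List.pyGetD v (c.toNat : Int) 0 + 1)) v).getD k 0 =
      v.getD k 0 + (cs.countP (fun c => c.toNat == k) : Int) := by
  induction cs generalizing v with
  | nil => simp
  | cons c t ih =>
    have hset : PySem.List.pySetD v (c.toNat : Int) (PySem.List.pyGetD v (c.toNat : Int) 0 + 1) = v.set c.toNat (v.getD c.toNat 0 + 1) := by
      rw [PySem.List.pySetD_natCast, PySem.List.pyGetD_natCast]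
    have hk' : k < (PySem.List.pySetD v (c.toNat : Int) (PySem.List.pyGetD v (c.toNat : Int) 0 + 1)).length := by
      rw [PySem.List.length_pySetD]; exact hk
    rw [List.foldl_cons, List.countP_cons, ih _ hk']
    by_cases hck : c.toNat = k
    · have h2 : (PySem.List.pySetD v (c.toNat : Int) (PySem.List.pyGetD v (c.toNat : Int) 0 + 1)).getD k 0 = v.getD k 0 + 1 := by
        rw [hset]
        subst hck
        simp [List.getD_eq_getElem?_getD, List.getElem?_set_self', List.getElem?_eq_getElem hk]
      rw [h2]
      simp only [hck, beq_self_eq_true, if_pos]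
      push_cast
      ring
    · have h2 : (PySem.List.pySetD v (c.toNat : Int) (PySem.List.pyGetD v (c.toNat : Int) 0 + 1)).getD k 0 = v.getD k 0 := by
        rw [hset]
        simp [List.getD_eq_getElem?_getD, List.getElem?_set_ne hck]
      rw [h2]
      simp [hck]

theorem pvB_vec_get (cs : List Char) (k : Nat) (hk : k < 256) :
    (pvB_vec cs).getD k 0 = (cs.countP (fun c => c.toNat == k) : Int) := by
  unfold pvB_vec
  rw [pv_vecGo_get cs (List.replicate 256 0) k (by rw [List.length_replicate]; exact hk)]
  rw [List.getD_eq_getElem _ 0 (by rw [List.length_replicate]; exact hk), List.getElem_replicate, zero_add]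

theorem pvB_vec_append (l1 l2 : List Char) :
    pvB_vec (l1 ++ l2) = List.zipWith (· + ·) (pvB_vec l1) (pvB_vec l2) := by
  apply List.ext_getElem
  · simp [pvB_vec_length]
  · intro k h1 h2
    have hk : k < 256 := by rw [pvB_vec_length] at h1; exact h1
    rw [List.getElem_zipWith]
    rw [← List.getD_eq_getElem _ 0, ← List.getD_eq_getElem _ 0, ← List.getD_eq_getElem _ 0]
    rw [pvB_vec_get _ _ hk, pvB_vec_get _ _ hk, pvB_vec_get _ _ hk]
    rw [List.countP_append]
    push_cast
    ring

theorem pvPre_append_le (ts : List (String × String)) (t : String × String) (i : Nat) (h : i ≤ ts.length) :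
    pvPre (ts ++ [t]) i = pvPre ts i := by
  unfold pvPre
  rw [List.take_append_of_le_length h]

theorem pvPre_append_full (ts : List (String × String)) (t : String × String) :
    pvPre (ts ++ [t]) (ts.length + 1) = pvPre ts ts.length ++ pvLW t := by
  unfold pvPre
  rw [List.take_of_length_le (by simp), List.map_append, List.flatten_append]
  simp [List.take_of_length_le]

theorem pvPre_split (tokens : List (String × String)) (s w : Nat) :
    pvPre tokens (s + w) = pvPre tokens s ++ pvWin tokens s w := by
  unfold pvPre pvWin
  rw [List.take_add, List.map_append, List.flatten_append]

theorem pvC_succ (consumed : List Int) (m : Nat) :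
    pvC consumed (m + 1) = pvC consumed m + (if PySem.Set.contains consumed (m : Int) then 1 else 0) := by
  unfold pvC
  rw [List.range_succ, List.countP_append]
  simp

theorem pvB_build4 (consumed : List Int) (tokens : List (String × String)) :
    (PySem.List.enumerate tokens).foldl
      (fun st jt =>
        let pv' := List.zipWith (· + ·) st.2.2.1 (pvB_vec (jt.2.2.toList.filter (fun c => c != ' ')))
        let cv' := st.2.2.2 + (if PySem.Set.contains consumed jt.1 then 1 else 0)
        (st.1 ++ [pv'], st.2.1 ++ [cv'], pv', cv'))
      ([List.replicate 256 0], [0], List.replicate 256 0, 0) =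
    ((List.range (tokens.length + 1)).map (fun i => pvB_vec (pvPre tokens i)),
     (List.range (tokens.length + 1)).map (fun i => pvC consumed i),
     pvB_vec (pvPre tokens tokens.length), pvC consumed tokens.length) := by
  induction tokens using List.reverseRecOn with
  | nil => rfl
  | append_singleton ts t ih =>
    rw [PySem.List.enumerate_append, List.foldl_append, ih]
    simp only [PySem.List.enumerate, List.foldl_cons, List.foldl_nil]
    have hpv : List.zipWith (· + ·) (pvB_vec (pvPre ts ts.length)) (pvB_vec (t.2.toList.filter (fun c => c != ' '))) = pvB_vec (pvPre (ts ++ [t]) (ts.length + 1)) := by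
      rw [pvPre_append_full, pvB_vec_append]
      rfl
    have hcv : pvC consumed ts.length + (if PySem.Set.contains consumed ((0 : Int) + (ts.length : Int)) then 1 else 0) = pvC consumed (ts.length + 1) := by
      rw [pvC_succ]
      norm_num
    have hlen : (ts ++ [t]).length + 1 = (ts.length + 1) + 1 := by simp
    have hstep : List.range ((ts.length + 1) + 1) = List.range (ts.length + 1) ++ [ts.length + 1] := List.range_succ
    have hP : (List.range ((ts ++ [t]).length + 1)).map (fun i => pvB_vec (pvPre (ts ++ [t]) i)) = (List.range (ts.length + 1)).map (fun i => pvB_vec (pvPre ts i)) ++ [pvB_vec (pvPre (ts ++ [t]) (ts.length + 1))] := by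
      rw [hlen, hstep, List.map_append]
      congr 1
      apply List.map_congr_left
      intro i hi
      rw [pvPre_append_le ts t i (by simp at hi; omega)]
    have hC : (List.range ((ts ++ [t]).length + 1)).map (fun i => pvC consumed i) = (List.range (ts.length + 1)).map (fun i => pvC consumed i) ++ [pvC consumed (ts.length + 1)] := by
      rw [hlen, hstep, List.map_append]
      rfl
    rw [hpv, hcv, hP, hC]
    have hlast : pvPre (ts ++ [t]) (ts ++ [t]).length = pvPre (ts ++ [t]) (ts.length + 1) := by simp
    have hlast2 : pvC consumed (ts ++ [t]).length = pvC consumed (ts.length + 1) := by simp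
    rw [hlast, hlast2]

theorem pvB_build_spec (consumed : List Int) (tokens : List (String × String)) :
    pvB_build consumed tokens =
      ((List.range (tokens.length + 1)).map (fun i => pvB_vec (pvPre tokens i)),
       (List.range (tokens.length + 1)).map (fun i => pvC consumed i)) := by
  unfold pvB_build
  rw [pvB_build4]

theorem pv_findSome?_congr {α β : Type} (f g : α → Option β) (l : List α) (h : ∀ x ∈ l, f x = g x) :
    l.findSome? f = l.findSome? g := by
  induction l with
  | nil => rfl
  | cons x t ih =>
    rw [List.findSome?_cons, List.findSome?_cons, h x (by simp)]
    cases g x with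
    | some v => rfl
    | none => exact ih (fun y hy => h y (by simp [hy]))

theorem pv_enumerate_map_range {α : Type} (f : Nat → α) (m : Nat) (s : Int) :
    PySem.List.enumerate ((List.range m).map f) s = (List.range m).map (fun (i : Nat) => (s + (i : Int), f i)) := by
  induction m with
  | zero => rfl
  | succ k ih =>
    rw [List.range_succ, List.map_append, List.map_append, PySem.List.enumerate_append, ih]
    simp [PySem.List.enumerate]

theorem pv_zip_maps {α β : Type} (P : Nat → α) (C : Nat → β) (n w : Nat) :
    List.zip ((List.range (n+1)).map P)
      (List.zip (List.drop w ((List.range (n+1)).map P))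
        (List.zip ((List.range (n+1)).map C) (List.drop w ((List.range (n+1)).map C)))) =
    (List.range (n+1-w)).map (fun s => (P s, (P (s+w), (C s, C (s+w))))) := by
  apply List.ext_getElem
  · simp
  · intro i h1 h2
    have hi : i < n + 1 - w := by simpa using h2
    simp [List.getElem_zip, List.getElem_drop, Nat.add_comm w i]

theorem pv_pyRange_zero_eq (n w : Nat) (ws : Int) (hws : ws = (w : Int)) :
    PySem.List.pyRange 0 ((n : Int) - ws + 1) = (List.range (n+1-w)).map (fun s => ((s : Nat) : Int)) := by
  by_cases hwn : w ≤ n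
  · have h1 : ((n : Int) - ws + 1) = ((n + 1 - w : Nat) : Int) := by omega
    rw [h1, PySem.List.pyRange_zero_natCast]
  · have h1 : ((n : Int) - ws + 1) ≤ 0 := by omega
    rw [PySem.List.pyRange_one_eq_nil h1]
    have h2 : n + 1 - w = 0 := by omega
    rw [h2]
    rfl

theorem pv_pyRange_shift (s w : Nat) (hw : 1 ≤ w) :
    PySem.List.pyRange (s : Int) ((s : Int) + (w : Int)) = (List.range w).map (fun k => ((s + k : Nat) : Int)) := by
  rw [PySem.List.pyRange_of_pos _ _ (by norm_num : (0:Int) < 1)]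
  have hlt : ((s : Int) < (s : Int) + (w : Int)) := by omega
  rw [if_pos hlt]
  have hc : ((s : Int) + (w : Int) - (s : Int) + 1 - 1) / 1 = (w : Int) := by omega
  rw [hc, Int.toNat_natCast]
  apply List.map_congr_left
  intro k _
  push_cast
  ring

theorem pv_contains_iff (consumed : List Int) (x : Int) : PySem.Set.contains consumed x = true ↔ x ∈ consumed := by
  simp [PySem.Set.contains]

theorem pv_consumed_iff (consumed : List Int) (s w : Nat) (hw : 1 ≤ w) :
    (PySem.Set.diff (PySem.Set.ofList (PySem.List.pyRange (s:Int) ((s:Int)+(w:Int)))) consumed = ([] : List Int)) ↔ (pvC consumed (s+w) - pvC consumed s = (w:Int)) := by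
  have key : ∀ x : Int, x ∈ PySem.Set.ofList (PySem.List.pyRange (s:Int) ((s:Int)+(w:Int))) ↔ ∃ k, k < w ∧ ((s+k : Nat) : Int) = x := by
    intro x
    rw [PySem.Set.mem_ofList, pv_pyRange_shift s w hw]
    simp [List.mem_map, List.mem_range]
  have sub1 : (PySem.Set.diff (PySem.Set.ofList (PySem.List.pyRange (s:Int) ((s:Int)+(w:Int)))) consumed = ([] : List Int)) ↔ (∀ k, k < w → ((s+k : Nat) : Int) ∈ consumed) := by
    unfold PySem.Set.diff
    rw [List.filter_eq_nil_iff]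
    constructor
    · intro h k hk
      have := h _ ((key _).mpr ⟨k, hk, rfl⟩)
      simp only [Bool.not_eq_true', Bool.not_eq_false] at this
      exact (pv_contains_iff _ _).mp this
    · intro h a ha
      obtain ⟨k, hk, rfl⟩ := (key a).mp ha
      simp only [Bool.not_eq_true', Bool.not_eq_false]
      exact (pv_contains_iff _ _).mpr (h k hk)
  have sub2 : (pvC consumed (s+w) - pvC consumed s = (w:Int)) ↔ (∀ k, k < w → ((s+k : Nat) : Int) ∈ consumed) := by
    unfold pvC
    rw [List.range_add, List.countP_append, List.countP_map]
    have hle : List.countP ((fun j : Nat => PySem.Set.contains consumed ((j : Int))) ∘ (fun x => s + x)) (List.range w) ≤ w := by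
      calc _ ≤ (List.range w).length := List.countP_le_length
      _ = w := List.length_range ..
    constructor
    · intro h k hk
      have hc : List.countP ((fun j : Nat => PySem.Set.contains consumed ((j : Int))) ∘ (fun x => s + x)) (List.range w) = w := by omega
      have hall := List.countP_eq_length.mp (by rw [hc, List.length_range])
      have := hall k (List.mem_range.mpr hk)
      exact (pv_contains_iff _ _).mp this
    · intro h
      have hc : List.countP ((fun j : Nat => PySem.Set.contains consumed ((j : Int))) ∘ (fun x => s + x)) (List.range w) = (List.range w).length := by
        rw [List.countP_eq_length.mpr]
        intro k hk
        exact (pv_contains_iff _ _).mpr (h k (List.mem_range.mp hk))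
      rw [hc, List.length_range]
      push_cast
      ring
  rw [sub1, sub2]

theorem pv_char_eq_of_toNat (c d : Char) (h : c.toNat = d.toNat) : c = d := by
  apply Char.ext
  exact UInt32.toNat_inj.mp h

theorem pv_perm_iff_countP (l1 l2 : List Char) (h1 : ∀ c ∈ l1, c.toNat < 256) (h2 : ∀ c ∈ l2, c.toNat < 256) :
    (∀ k : Nat, k < 256 → l1.countP (fun c => c.toNat == k) = l2.countP (fun c => c.toNat == k)) ↔ l1.Perm l2 := by
  constructor
  · intro h
    rw [List.perm_iff_count]
    intro c
    by_cases hc : c.toNat < 256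
    · have e : ∀ l : List Char, l.count c = l.countP (fun x => x.toNat == c.toNat) := by
        intro l
        rw [List.count_eq_countP]
        apply List.countP_congr
        intro x _
        constructor
        · intro hx; simp at hx ⊢; rw [hx]
        · intro hx; simp at hx ⊢; exact pv_char_eq_of_toNat _ _ hx
      rw [e l1, e l2, h c.toNat hc]
    · rw [List.count_eq_zero.mpr (fun hm => hc (h1 c hm)), List.count_eq_zero.mpr (fun hm => hc (h2 c hm))]
  · intro hp k _
    exact hp.countP_eq _

theorem pv_all_zip3 (a b c : List Int) (p : Int × Int × Int → Bool) (ha : a.length = 256) (hb : b.length = 256) (hc : c.length = 256) :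
    ((List.zip a (List.zip b c)).all p = true) ↔ ∀ k : Nat, k < 256 → p (a.getD k 0, b.getD k 0, c.getD k 0) = true := by
  have hlen : (List.zip a (List.zip b c)).length = 256 := by
    simp [ha, hb, hc]
  rw [List.all_eq_true]
  constructor
  · intro h k hk
    have hk' : k < (List.zip a (List.zip b c)).length := by omega
    have hmem := List.getElem_mem hk'
    have := h _ hmem
    rw [List.getElem_zip, List.getElem_zip] at this
    rwa [List.getD_eq_getElem a 0 (by omega), List.getD_eq_getElem b 0 (by omega), List.getD_eq_getElem c 0 (by omega)]
  · intro h x hx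
    obtain ⟨k, hk, rfl⟩ := List.mem_iff_getElem.mp hx
    rw [List.getElem_zip, List.getElem_zip]
    have hk2 : k < 256 := by omega
    have := h k hk2
    rwa [List.getD_eq_getElem a 0 (by omega), List.getD_eq_getElem b 0 (by omega), List.getD_eq_getElem c 0 (by omega)] at this

theorem pv_spanWords {α : Type} (tokens : List (String × String)) (s w : Nat) (hw : 1 ≤ w) (hsw : s + w ≤ tokens.length) (d : String × String) (f : String × String → α) :
    (PySem.List.pyRange (s:Int) ((s:Int)+(w:Int))).map (fun j => f (PySem.List.pyGetD tokens j d)) = ((tokens.drop s).take w).map f := by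
  rw [pv_pyRange_shift s w hw, List.map_map]
  apply List.ext_getElem
  · simp
    omega
  · intro i h1 h2
    have hi : i < w := by simpa using h1
    have hin : s + i < tokens.length := by omega
    simp only [List.getElem_map, List.getElem_range, Function.comp_apply]
    rw [PySem.List.pyGetD_natCast, List.getD_eq_getElem _ _ hin, List.getElem_take, List.getElem_drop]

theorem pv_spanLetters (tokens : List (String × String)) (s w : Nat) (hw : 1 ≤ w) (hsw : s + w ≤ tokens.length) :
    PySem.Chars.replace (PySem.Str.join "" ((PySem.List.pyRange (s:Int) ((s:Int)+(w:Int))).map (fun j => (PySem.List.pyGetD tokens j ("", "")).2))).toList [' '] [] = pvWin tokens s w := by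
  rw [pv_spanWords tokens s w hw hsw ("", "") (fun t => t.2)]
  rw [PySem.Str.join, String.toList_ofList, pv_replace_filter]
  have h0 : ("" : String).toList = ([] : List Char) := rfl
  rw [h0, pv_join_empty, List.filter_flatten]
  unfold pvWin
  rw [List.map_map, List.map_map]
  rfl

-- the characterization of A's inner loop as a findSome? over the admissible starts
theorem pv_innerA_eq (tokens : List (String × String)) (consumed : List Int) (target : List Char) (ws : Int) (hws : 1 ≤ ws) :
    ∀ (m : Nat) (a : Int), (((tokens.length : Int) - a).toNat ≤ m) →
      pvA_inner tokens consumed target ws (PySem.List.pyRange a (tokens.length : Int)) =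
      (PySem.List.pyRange a ((tokens.length : Int) - ws + 1)).findSome? (pvCheckA tokens consumed target ws) := by
  intro m
  induction m with
  | zero =>
    intro a ha
    have h1 : (tokens.length : Int) ≤ a := by omega
    rw [PySem.List.pyRange_one_eq_nil h1, PySem.List.pyRange_one_eq_nil (by omega)]
    rfl
  | succ k ih =>
    intro a ha
    by_cases h1 : (tokens.length : Int) ≤ a
    · rw [PySem.List.pyRange_one_eq_nil h1, PySem.List.pyRange_one_eq_nil (by omega)]
      rfl
    · rw [not_le] at h1
      rw [PySem.List.pyRange_one_cons h1]
      by_cases h2 : a + ws > (tokens.length : Int)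
      · rw [pvA_inner, if_pos h2, PySem.List.pyRange_one_eq_nil (by omega)]
        rfl
      · rw [not_lt] at h2
        have hrec := ih (a + 1) (by omega)
        have hcons : PySem.List.pyRange a ((tokens.length : Int) - ws + 1) = a :: PySem.List.pyRange (a + 1) ((tokens.length : Int) - ws + 1) := PySem.List.pyRange_one_cons (by omega)
        rw [hcons, List.findSome?_cons, pvA_inner, if_neg (by omega)]
        simp only
        unfold pvCheckA
        by_cases h3 : PySem.Set.diff (PySem.Set.ofList (PySem.List.pyRange a (a + ws))) consumed = ([] : List Int)
        · rw [if_pos h3, if_pos h3, hrec]; rfl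
        · rw [if_neg h3, if_neg h3]
          by_cases h4 : PySem.List.sorted (PySem.Chars.replace (PySem.Str.join "" ((PySem.List.pyRange a (a + ws)).map (fun j => (PySem.List.pyGetD tokens j ("", "")).2))).toList [' '] []) (fun x => x) = target
          · rw [if_pos h4, if_pos h4]
          · rw [if_neg h4, if_neg h4, hrec]; rfl

theorem pv_dom_char_lt (c : Char) (h : pvDomChar c = true) : c.toNat < 256 := by
  unfold pvDomChar at h
  simp at h
  omega

theorem pv_lowerChar_lt (c : Char) (h : pvDomChar c = true) : (PySem.Chars.lowerChar c).toNat < 256 := by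
  have hc := pv_dom_char_lt c h
  unfold pvDomChar at h
  simp at h
  unfold PySem.Chars.lowerChar
  split
  · rw [Char.toNat_ofNat]
    have hv : (c.toNat + 32).isValidChar := Or.inl (by omega)
    simp [hv]
    omega
  · exact hc

-- B's window test is A's anagram test
theorem pv_btest_iff (tokens : List (String × String)) (yL : List Char) (s w : Nat)
    (hTok : ∀ c ∈ pvWin tokens s w, c.toNat < 256) (hyL : ∀ c ∈ yL, c.toNat < 256) :
    ((List.zip (pvB_vec (pvPre tokens (s+w))) (List.zip (pvB_vec (pvPre tokens s)) (pvB_vec yL))).all (fun x => x.1 - x.2.1 == x.2.2) = true) ↔ (pvWin tokens s w).Perm yL := by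
  rw [pv_all_zip3 _ _ _ _ (pvB_vec_length _) (pvB_vec_length _) (pvB_vec_length _)]
  rw [← pv_perm_iff_countP _ _ hTok hyL]
  constructor
  · intro h k hk
    have := h k hk
    rw [pvB_vec_get _ _ hk, pvB_vec_get _ _ hk, pvB_vec_get _ _ hk, pvPre_split, List.countP_append] at this
    simp at this
    omega
  · intro h k hk
    rw [pvB_vec_get _ _ hk, pvB_vec_get _ _ hk, pvB_vec_get _ _ hk, pvPre_split, List.countP_append]
    have := h k hk
    simp
    omega

-- ===== VERDICT (by name: the statement is the Claim_ definition above) =====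
theorem align_anagram_py_spec : Claim_equal_align_anagram_py := by
  intro yields available tokens consumed hDom
  unfold Spec_align_anagram_py align_anagram_py align_anagram_py_alt
  by_cases hy : yields.toList = []
  · rw [if_pos hy, if_pos hy]
  · rw [if_neg hy, if_neg hy]
    -- domain facts
    unfold Dom_align_anagram_py at hDom
    simp only [Bool.and_eq_true, List.all_eq_true] at hDom
    obtain ⟨⟨⟨hYd, _⟩, hTok⟩, _⟩ := hDom
    have hyLb : ∀ c ∈ (PySem.Str.lower yields).toList.filter (fun c => c != ' '), c.toNat < 256 := by
      intro c hc
      have hc2 : c ∈ (PySem.Str.lower yields).toList := List.mem_of_mem_filter hc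
      rw [PySem.Str.lower, String.toList_ofList, PySem.Chars.lower, List.mem_map] at hc2
      obtain ⟨c', hc', rfl⟩ := hc2
      exact pv_lowerChar_lt c' (by
        have := hYd
        unfold pvDomStr at this
        exact List.all_eq_true.mp this c' hc')
    have hWinb : ∀ s w : Nat, ∀ c ∈ pvWin tokens s w, c.toNat < 256 := by
      intro s w c hc
      unfold pvWin at hc
      rw [List.mem_flatten] at hc
      obtain ⟨l, hl, hcl⟩ := hc
      rw [List.mem_map] at hl
      obtain ⟨t, ht, rfl⟩ := hl
      have ht2 : t ∈ tokens := List.mem_of_mem_drop (List.mem_of_mem_take ht)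
      have hd := hTok t ht2
      have : c ∈ t.2.toList := List.mem_of_mem_filter hcl
      exact pv_dom_char_lt c (by
        have h2 := hd.2
        unfold pvDomStr at h2
        exact List.all_eq_true.mp h2 c this)
    have hlen : (PySem.List.sorted (available.map (fun t => t.1)) (fun x => x)).length = available.length := by
      rw [PySem.List.length_sorted, List.length_map]
    simp only [hlen, pvB_build_spec]
    apply pv_findSome?_congr
    intro ws hwsmem
    obtain ⟨hws1, hws2⟩ := PySem.List.mem_pyRange_one.mp hwsmem
    set w := ws.toNat with hwdef
    have hwe : ws = (w : Int) := by omega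
    have hw1 : 1 ≤ w := by omega
    set n := tokens.length with hndef
    -- A side: inner loop as findSome? over admissible starts
    rw [pv_innerA_eq tokens consumed _ ws hws1 ((n : Int) - 0).toNat 0 (le_refl _)]
    rw [pv_pyRange_zero_eq n w ws hwe, List.findSome?_map]
    -- B side: prefix lists as maps over ranges
    rw [PySem.List.slice_from _ (by omega : (0:Int) ≤ ws), PySem.List.slice_from _ (by omega : (0:Int) ≤ ws)]
    rw [← hwdef]
    rw [pv_zip_maps (fun i => pvB_vec (pvPre tokens i)) (fun i => pvC consumed i) n w]
    rw [pv_enumerate_map_range _ _ 0, List.findSome?_map]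
    apply pv_findSome?_congr
    intro s hsmem
    have hs : s < n + 1 - w := List.mem_range.mp hsmem
    have hsw : s + w ≤ n := by omega
    simp only [Function.comp_apply]
    -- pointwise equality of the two window checks
    unfold pvCheckA
    rw [hwe]
    by_cases hcons : pvC consumed (s + w) - pvC consumed s = ((w : Nat) : Int)
    · rw [if_pos ((pv_consumed_iff consumed s w hw1).mpr hcons)]
      rw [if_pos hcons]
    · rw [if_neg (fun hdiff => hcons ((pv_consumed_iff consumed s w hw1).mp hdiff))]
      rw [if_neg hcons]
      have htest : (PySem.List.sorted (PySem.Chars.replace (PySem.Str.join "" ((PySem.List.pyRange (s:Int) ((s:Int)+(w:Int))).map (fun j => (PySem.List.pyGetD tokens j ("", "")).2))).toList [' '] []) (fun x => x) = PySem.List.sorted (PySem.Chars.replace (PySem.Str.lower yields).toList [' '] []) (fun x => x)) ↔ ((List.zip (pvB_vec (pvPre tokens (s+w))) (List.zip (pvB_vec (pvPre tokens s)) (pvB_vec ((PySem.Str.lower yields).toList.filter (fun c => c != ' '))))).all (fun x => x.1 - x.2.1 == x.2.2) = true) := by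
        rw [pv_spanLetters tokens s w hw1 hsw, pv_replace_filter]
        rw [PySem.List.sorted_id_eq_sorted_id_iff_perm]
        rw [pv_btest_iff tokens _ s w (hWinb s w) hyLb]
      by_cases ht : PySem.List.sorted (PySem.Chars.replace (PySem.Str.join "" ((PySem.List.pyRange (s:Int) ((s:Int)+(w:Int))).map (fun j => (PySem.List.pyGetD tokens j ("", "")).2))).toList [' '] []) (fun x => x) = PySem.List.sorted (PySem.Chars.replace (PySem.Str.lower yields).toList [' '] []) (fun x => x)
      · rw [if_pos ht, if_pos (htest.mp ht)]
        -- equal outputs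
        have hjoin : ((PySem.List.pyRange (s:Int) ((s:Int)+(w:Int))).map (fun j => (PySem.List.pyGetD tokens j ("", "")).1)) = (PySem.List.slice tokens (some ((s:Int))) (some ((s:Int) + (w:Int)))).map (fun t => t.1) := by
          rw [pv_spanWords tokens s w hw1 hsw ("", "") (fun t => t.1)]
          have h2 : ((s:Int) + (w:Int)) = ((s + w : Nat) : Int) := by push_cast; ring
          rw [h2, PySem.List.slice_natCast]
          have h3 : s + w - s = w := by omega
          rw [h3]
        rw [hjoin]
        norm_num
      · rw [if_neg ht, if_neg (fun hb => ht (htest.mpr hb))]
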